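-- pv_equiv track=rewrite | github.com/Mical-kiss/py-cut-video | yolov5_test/main.py | generate_new_array2
-- ===== SOURCE A (Python) =====
-- def generate_new_array2(arr): # 清理0的连续性低于4的区间
--     new_arr = arr.copy()
--     start = -1
--     end = -1
--
--     for i in range(len(arr)):
--         if arr[i] == 0:
--             if start == -1:
--                 start = i
--             end = i
--         else:
--             if start != -1:
--                 if end - start + 1 < 4:
--                     new_arr[start:end+1] = [1] * (end - start + 1)
--                 start = -1
--                 end = -1
--
--     if start != -1 and end != -1 and end - start + 1 < 4:
--         new_arr[start:end+1] = [1] * (end - start + 1)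
--
--     return new_arr
-- ===== SOURCE B (Python) =====
-- from itertools import groupby
--
-- def generate_new_array2(arr):
--     out = []
--     for is_zero, grp in groupby(arr, key=lambda x: x == 0):
--         items = list(grp)
--         if is_zero and len(items) < 4:
--             out.extend([1] * len(items))
--         else:
--             out.extend(items)
--     return out
-- ===== Notes on version B (the rewrite author's own statement) =====
-- stated objective: idiomatic
-- what changed: Replaced the explicit start/end state machine with in-place slice assignment by itertools.groupby run segmentation that emits one piece per maximal zero/non-zero run.
import Mathlib
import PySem

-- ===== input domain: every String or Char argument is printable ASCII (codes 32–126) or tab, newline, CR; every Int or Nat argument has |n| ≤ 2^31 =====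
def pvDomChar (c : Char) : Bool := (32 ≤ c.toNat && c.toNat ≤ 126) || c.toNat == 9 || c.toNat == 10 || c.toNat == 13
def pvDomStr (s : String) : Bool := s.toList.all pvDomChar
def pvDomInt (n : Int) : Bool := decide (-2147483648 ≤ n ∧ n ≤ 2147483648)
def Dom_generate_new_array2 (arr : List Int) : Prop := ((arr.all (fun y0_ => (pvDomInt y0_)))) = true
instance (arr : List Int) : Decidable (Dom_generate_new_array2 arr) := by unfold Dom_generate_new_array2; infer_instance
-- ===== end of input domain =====

-- B replaces A's index/start/end state machine (with in-place slice assignment) by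
-- groupby-style run segmentation emitting one piece per maximal run (idiomatic; same cost).

-- ===== PORT A =====
-- new_arr[start:end+1] = [1] * (end - start + 1); A only performs it with 0 ≤ start ≤ end < len
def pvSetSlice (na : List Int) (s e : Int) : List Int :=
  na.take s.toNat ++ List.replicate (e - s + 1).toNat 1 ++ na.drop (e + 1).toNat

-- the for-loop over range(len(arr)); i is the loop index, state = (new_arr, start, end)
def pvAGo : List Int → Int → List Int × Int × Int → List Int × Int × Int
  | [], _, st => st
  | x :: xs, i, (na, s, e) =>
    if x = 0 then
      pvAGo xs (i + 1) (na, (if s = -1 then i else s), i)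
    else
      if s ≠ -1 then
        pvAGo xs (i + 1) ((if e - s + 1 < 4 then pvSetSlice na s e else na), -1, -1)
      else
        pvAGo xs (i + 1) (na, s, e)

def generate_new_array2 (arr : List Int) : List Int :=
  let st := pvAGo arr 0 (arr, -1, -1)
  if st.2.1 ≠ -1 ∧ st.2.2 ≠ -1 ∧ st.2.2 - st.2.1 + 1 < 4 then
    pvSetSlice st.1 st.2.1 st.2.2
  else st.1

-- ===== PORT B =====
-- groupby(arr, key=lambda x: x == 0): each step peels one maximal run of the head's key
def pvAltGo : List Int → List Int
  | [] => []
  | x :: xs =>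
    let grp := x :: xs.takeWhile (fun y => (y == 0) == (x == 0))
    let rest := xs.dropWhile (fun y => (y == 0) == (x == 0))
    (if x = 0 ∧ grp.length < 4 then List.replicate grp.length 1 else grp) ++ pvAltGo rest
termination_by l => l.length
decreasing_by
  simp only [List.length_cons]
  exact Nat.lt_succ_of_le (List.length_dropWhile_le _ _)

def generate_new_array2_alt (arr : List Int) : List Int := pvAltGo arr

-- ===== PRECONDITION & SPEC =====
def Spec_generate_new_array2 (arr : List Int) (out : List Int) : Prop := out = generate_new_array2_alt arr
instance (arr : List Int) (out : List Int) : Decidable (Spec_generate_new_array2 arr out) := by unfold Spec_generate_new_array2; infer_instance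

-- ===== CLAIM (what is proved, stated in full; the proofs are below) =====
def Claim_equal_generate_new_array2 : Prop := ∀ (arr : List Int), Dom_generate_new_array2 arr → Spec_generate_new_array2 arr (generate_new_array2 arr)

-- ===== LEMMAS AND PROOFS =====

-- the final fixup after the loop
def pvFinish (st : List Int × Int × Int) : List Int :=
  if st.2.1 ≠ -1 ∧ st.2.2 ≠ -1 ∧ st.2.2 - st.2.1 + 1 < 4 then
    pvSetSlice st.1 st.2.1 st.2.2
  else st.1

lemma pvA_eq_finish (arr : List Int) :
    generate_new_array2 arr = pvFinish (pvAGo arr 0 (arr, -1, -1)) := rfl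

lemma pvPredFalse (x : Int) (hx : x ≠ 0) :
    (fun y : Int => (y == 0) == (x == 0)) = (fun y : Int => !(y == 0)) := by
  funext y
  rw [show (x == 0) = false from by simp [hx]]
  cases y == 0 <;> rfl

lemma pvPredTrue :
    (fun y : Int => (y == 0) == ((0 : Int) == 0)) = (fun y : Int => y == 0) := by
  funext y
  rw [show ((0 : Int) == 0) = true from rfl]
  cases y == 0 <;> rfl

lemma pvAltGo_split (xs : List Int) :
    pvAltGo xs = xs.takeWhile (fun y => !(y == 0)) ++ pvAltGo (xs.dropWhile (fun y => !(y == 0))) := by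
  cases xs with
  | nil => simp
  | cons z zs =>
    by_cases hz : z = 0
    · subst hz; simp [List.takeWhile, List.dropWhile]
    · rw [pvAltGo, pvPredFalse z hz]
      simp [hz]

lemma pvAltGo_nonzero (x : Int) (xs : List Int) (hx : x ≠ 0) :
    pvAltGo (x :: xs) = x :: pvAltGo xs := by
  rw [pvAltGo]
  rw [pvPredFalse x hx]
  simp only [hx, false_and, if_false]
  rw [pvAltGo_split xs]
  simp

lemma pvAltGo_zero (xs : List Int) :
    pvAltGo (0 :: xs) =
      (if (0 :: xs.takeWhile (fun y => y == 0)).length < 4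
        then List.replicate (0 :: xs.takeWhile (fun y => y == 0)).length (1 : Int)
        else 0 :: xs.takeWhile (fun y => y == 0))
      ++ pvAltGo (xs.dropWhile (fun y => y == 0)) := by
  rw [pvAltGo, pvPredTrue]
  simp

-- zero run: s ≠ -1, invariant e = i - 1
lemma pvAGo_zrun (k : ℕ) (rest na : List Int) (i s : Int) (hs : s ≠ -1) :
    pvAGo (List.replicate k 0 ++ rest) i (na, s, i - 1)
      = pvAGo rest (i + k) (na, s, i + k - 1) := by
  induction k generalizing i with
  | zero => simp
  | succ k ih =>
    rw [List.replicate_succ, List.cons_append, pvAGo]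
    rw [if_pos (show (0 : Int) = 0 from rfl), if_neg hs]
    have h := ih (i + 1)
    rw [show (i : Int) + 1 - 1 = i from by ring] at h
    have e1 : (i : Int) + 1 + k = i + (k + 1 : ℕ) := by push_cast; ring
    rw [e1] at h
    exact h

lemma pvSetSlice_eq (pre tail : List Int) (m : ℕ) :
    pvSetSlice (pre ++ List.replicate m 0 ++ tail) (pre.length : Int) ((pre.length : Int) + m - 1)
      = pre ++ List.replicate m 1 ++ tail := by
  unfold pvSetSlice
  have h1 : ((pre.length : Int)).toNat = pre.length := by simp
  have h2 : ((pre.length : Int) + m - 1 - pre.length + 1).toNat = m := by omega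
  have h3 : ((pre.length : Int) + m - 1 + 1).toNat = pre.length + m := by omega
  rw [h1, h2, h3]
  have ht : List.take pre.length (pre ++ List.replicate m 0 ++ tail) = pre := by
    rw [List.append_assoc]; exact List.take_left
  have hd : List.drop (pre.length + m) (pre ++ List.replicate m 0 ++ tail) = tail :=
    List.drop_left' (by simp)
  rw [ht, hd]

lemma pvMain : ∀ (n : ℕ) (xs pre : List Int), xs.length ≤ n →
    pvFinish (pvAGo xs (pre.length : Int) (pre ++ xs, -1, -1)) = pre ++ pvAltGo xs := by
  intro n
  induction n with
  | zero =>
    intro xs pre h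
    have hx : xs = [] := List.eq_nil_of_length_eq_zero (Nat.le_zero.mp h)
    subst hx
    simp [pvAGo, pvFinish, pvAltGo]
  | succ n ih =>
    intro xs pre h
    match xs with
    | [] => simp [pvAGo, pvFinish, pvAltGo]
    | x :: xs' =>
      by_cases hx : x = 0
      · subst hx
        have hL : (pre.length : Int) ≠ -1 := by omega
        have hsplit : xs' = xs'.takeWhile (fun y => y == 0) ++ xs'.dropWhile (fun y => y == 0) :=
          (List.takeWhile_append_dropWhile).symm
        set t := xs'.takeWhile (fun y => y == 0) with ht
        set d := xs'.dropWhile (fun y => y == 0) with hd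
        set k := t.length with hk
        have htz : t = List.replicate k 0 := List.eq_replicate_of_mem (fun b hb => by
          have := List.mem_takeWhile_imp hb; simpa using this)
        rw [pvAGo]
        rw [show xs' = List.replicate k 0 ++ d from htz ▸ hsplit]
        rw [if_pos (show (0 : Int) = 0 from rfl), if_pos (show (-1 : Int) = -1 from rfl)]
        have hz := pvAGo_zrun k d (pre ++ 0 :: (List.replicate k 0 ++ d))
          ((pre.length : Int) + 1) (pre.length : Int) hL
        rw [show ((pre.length : Int)) + 1 - 1 = (pre.length : Int) from by ring] at hz
        rw [hz]
        have hna : pre ++ 0 :: (List.replicate k 0 ++ d)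
            = pre ++ List.replicate (k + 1) 0 ++ d := by
          simp [List.replicate_succ, List.append_assoc]
        have hrhs : pre ++ pvAltGo (0 :: (List.replicate k 0 ++ d))
            = pre ++ ((if k + 1 < 4 then List.replicate (k + 1) (1 : Int)
                else List.replicate (k + 1) (0 : Int)) ++ pvAltGo d) := by
          rw [show List.replicate k 0 ++ d = xs' from by rw [hsplit, htz]]
          rw [pvAltGo_zero xs', ← ht, ← hd, htz]
          simp [List.replicate_succ]
        rw [hrhs, hna]
        match hdc : d with
        | [] =>
          rw [pvAGo, pvFinish]
          have he : (pre.length : Int) + 1 + k - 1 = (pre.length : Int) + k := by ring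
          by_cases hk4 : k + 1 < 4
          · have hc : ((pre.length : Int) ≠ -1 ∧ (pre.length : Int) + 1 + k - 1 ≠ -1 ∧
                (pre.length : Int) + 1 + k - 1 - pre.length + 1 < 4) := by
              refine ⟨hL, by omega, by omega⟩
            rw [if_pos hc]
            have := pvSetSlice_eq pre ([] : List Int) (k + 1)
            simp only [List.append_nil] at this ⊢
            rw [show ((pre.length : Int)) + 1 + k - 1 = (pre.length : Int) + (k + 1 : ℕ) - 1 from by
              push_cast; ring]
            rw [this, if_pos hk4]
            simp [pvAltGo]
          · have hc : ¬((pre.length : Int) ≠ -1 ∧ (pre.length : Int) + 1 + k - 1 ≠ -1 ∧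
                (pre.length : Int) + 1 + k - 1 - pre.length + 1 < 4) := by
              intro hcc; omega
            rw [if_neg hc, if_neg hk4]
            simp [pvAltGo]
        | y :: r =>
          have hy : y ≠ 0 := by
            have hh := List.head_dropWhile_not (fun z : Int => z == 0) (l := xs')
              (by simp [← hd])
            simp [← hd] at hh
            exact hh
          rw [pvAGo]
          rw [if_neg hy]
          rw [if_pos (by exact hL : (pre.length : Int) ≠ -1)]
          have hslice : (if (pre.length : Int) + 1 + k - 1 - pre.length + 1 < 4 then
                pvSetSlice (pre ++ List.replicate (k + 1) 0 ++ y :: r) (pre.length : Int)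
                  ((pre.length : Int) + 1 + k - 1)
              else pre ++ List.replicate (k + 1) 0 ++ y :: r)
              = pre ++ (if k + 1 < 4 then List.replicate (k + 1) (1 : Int)
                  else List.replicate (k + 1) (0 : Int)) ++ y :: r := by
            by_cases hk4 : k + 1 < 4
            · rw [if_pos (by omega), if_pos hk4]
              rw [show ((pre.length : Int)) + 1 + k - 1 = (pre.length : Int) + (k + 1 : ℕ) - 1 from by
                push_cast; ring]
              exact pvSetSlice_eq pre (y :: r) (k + 1)
            · rw [if_neg (by omega), if_neg hk4]
          rw [hslice]
          set w := (if k + 1 < 4 then List.replicate (k + 1) (1 : Int)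
              else List.replicate (k + 1) (0 : Int)) with hw
          have hwlen : w.length = k + 1 := by
            rw [hw]; by_cases hk4 : k + 1 < 4 <;> simp [hk4]
          have hform : pre ++ w ++ y :: r = (pre ++ w ++ [y]) ++ r := by simp
          have hidx : (pre.length : Int) + 1 + k + 1 = ((pre ++ w ++ [y]).length : Int) := by
            simp [hwlen]; ring
          rw [hform, hidx, ih r (pre ++ w ++ [y]) (by
            have hlen : xs'.length = k + (r.length + 1) := by
              rw [hsplit, htz]; simp
            have : (0 :: xs').length ≤ n + 1 := h
            simp [hlen] at this; omega)]
          rw [pvAltGo_nonzero y r hy]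
          simp
      · rw [pvAGo]
        rw [if_neg hx, if_neg (by simp : ¬((-1 : Int) ≠ -1))]
        have h1 : pre ++ x :: xs' = (pre ++ [x]) ++ xs' := by simp
        have h2 : (pre.length : Int) + 1 = ((pre ++ [x]).length : Int) := by simp
        rw [h1, h2, ih xs' (pre ++ [x]) (by simpa using Nat.le_of_succ_le_succ h)]
        rw [pvAltGo_nonzero x xs' hx]
        simp

-- ===== VERDICT (by name: the statement is the Claim_ definition above) =====
theorem generate_new_array2_spec : Claim_equal_generate_new_array2 := by
  intro arr _
  unfold Spec_generate_new_array2 generate_new_array2_alt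
  have h := pvMain arr.length arr [] le_rfl
  simpa [pvA_eq_finish] using h
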